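-- pv_equiv track=rewrite | github.com/druirom/AIN_Proyecto | agent.py | _partir_tokens_largos
-- ===== SOURCE A (Python) =====
-- def _partir_tokens_largos(texto: str, max_len: int = 40) -> str:
--     """Parte palabras muy largas (urls, etc.) insertando espacios cada max_len caracteres.
--     Asi fpdf siempre tiene un punto donde cortar la linea."""
--
--     palabras = texto.split(" ")
--     resultado = []
--     for p in palabras:
--         if len(p) > max_len:
--             # cortar en trozos de max_len
--             trozos = [p[i:i+max_len] for i in range(0, len(p), max_len)]
--             resultado.append(" ".join(trozos))
--         else:
--             resultado.append(p)
--     return " ".join(resultado)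
-- ===== SOURCE B (Python) =====
-- def _partir_tokens_largos(texto: str, max_len: int = 40) -> str:
--     """Single left-to-right scan: copy chars, counting the current run of
--     non-space chars; once the run reaches max_len, emit a breaking space."""
--     out = []
--     run = 0
--     for ch in texto:
--         if ch == ' ':
--             out.append(ch)
--             run = 0
--         elif run == max_len:
--             out.append(' ')
--             out.append(ch)
--             run = 1
--         else:
--             out.append(ch)
--             run += 1
--     return ''.join(out)
-- ===== Notes on version B (the rewrite author's own statement) =====
-- stated objective: alternative
-- what changed: Replaces split-on-space / slice-into-chunks / two joins with a single left-to-right character scan that keeps a counter of the current non-space run and inserts a breaking space when the run reaches max_len.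
-- intended difference: For max_len < 0 with some non-space character present, A replaces every word by the empty string (the negative-step range yields no chunks) and returns only the spaces, while B returns texto unchanged, the intended value since no word needs splitting. — e.g. on _partir_tokens_largos("ab", -1): A returns "", B returns "ab"
import Mathlib
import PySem

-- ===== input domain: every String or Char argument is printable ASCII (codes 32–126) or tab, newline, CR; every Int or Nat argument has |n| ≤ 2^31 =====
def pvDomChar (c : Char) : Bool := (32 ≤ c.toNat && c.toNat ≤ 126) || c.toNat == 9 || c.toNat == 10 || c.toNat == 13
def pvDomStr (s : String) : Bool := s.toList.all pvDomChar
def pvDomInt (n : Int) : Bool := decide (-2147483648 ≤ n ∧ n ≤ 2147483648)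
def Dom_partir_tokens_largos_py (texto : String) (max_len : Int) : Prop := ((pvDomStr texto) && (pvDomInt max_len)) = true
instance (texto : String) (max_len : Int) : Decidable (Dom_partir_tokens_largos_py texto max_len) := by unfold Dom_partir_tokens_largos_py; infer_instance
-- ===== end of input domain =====

-- B replaces A's split / chunk-by-slices / double join with one left-to-right scan that
-- counts the current non-space run and inserts a breaking space when it reaches max_len
-- (objective: alternative decomposition, one pass, no intermediate word/chunk lists).

-- ===== PORT A =====
-- trozos = [p[i:i+max_len] for i in range(0, len(p), max_len)]
def pvChunksA (p : List Char) (max_len : Int) : List (List Char) :=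
  (PySem.List.pyRange 0 (p.length : Int) max_len).map
    (fun i => PySem.List.slice p (some i) (some (i + max_len)))

-- the body of A's for-loop for one word p
def pvWordA (p : List Char) (max_len : Int) : List Char :=
  if (p.length : Int) > max_len then PySem.Chars.join [' '] (pvChunksA p max_len) else p

def partir_tokens_largos_py (texto : String) (max_len : Int) : String :=
  let palabras := PySem.Chars.splitOn texto.toList [' ']
  let resultado := palabras.foldl (fun acc p => acc ++ [pvWordA p max_len]) ([] : List (List Char))
  String.ofList (PySem.Chars.join [' '] resultado)

-- ===== PORT B =====
-- one step of B's scan: state = (output chars, length of current non-space run)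
def pvStepB (max_len : Int) (st : List Char × Int) (ch : Char) : List Char × Int :=
  if ch = ' ' then (st.1 ++ [ch], 0)
  else if st.2 = max_len then (st.1 ++ [' ', ch], 1)
  else (st.1 ++ [ch], st.2 + 1)

def partir_tokens_largos_py_alt (texto : String) (max_len : Int) : String :=
  String.ofList (texto.toList.foldl (pvStepB max_len) (([] : List Char), (0 : Int))).1

-- ===== PRECONDITION & SPEC =====
-- Pre_ excludes exactly the inputs where A raises: max_len = 0 together with a non-space
-- character makes range(0, len(p), 0) raise ValueError.
def Pre_partir_tokens_largos_py (texto : String) (max_len : Int) : Prop :=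
  max_len ≠ 0 ∨ ∀ c ∈ texto.toList, c = ' '
instance (texto : String) (max_len : Int) : Decidable (Pre_partir_tokens_largos_py texto max_len) := by
  unfold Pre_partir_tokens_largos_py; infer_instance

def pvWitness_partir_tokens_largos_py : String × Int := ("abcde fg", 3)

-- On negative max_len with a non-space character present, A replaces every word by the
-- empty string (the negative-step range yields no chunks) and returns only the spaces,
-- while B returns texto unchanged — the intended value, since no word needs splitting.
def D_partir_tokens_largos_py (texto : String) (max_len : Int) : Prop :=
  max_len < 0 ∧ texto.toList.any (fun c => c != ' ') = true
instance (texto : String) (max_len : Int) : Decidable (D_partir_tokens_largos_py texto max_len) := by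
  unfold D_partir_tokens_largos_py; infer_instance

def Spec_partir_tokens_largos_py (texto : String) (max_len : Int) (out : String) : Prop :=
  ¬ D_partir_tokens_largos_py texto max_len → out = partir_tokens_largos_py_alt texto max_len
instance (texto : String) (max_len : Int) (out : String) : Decidable (Spec_partir_tokens_largos_py texto max_len out) := by
  unfold Spec_partir_tokens_largos_py; infer_instance

def pvDiffWitness_partir_tokens_largos_py : String × Int := ("ab", -1)
def pvDiffWitnessOut_partir_tokens_largos_py : String × String := ("", "ab")

-- ===== CLAIM (what is proved, stated in full; the proofs are below) =====
def Claim_unchanged_partir_tokens_largos_py : Prop := ∀ (texto : String) (max_len : Int), Dom_partir_tokens_largos_py texto max_len → Pre_partir_tokens_largos_py texto max_len → Spec_partir_tokens_largos_py texto max_len (partir_tokens_largos_py texto max_len)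
def Claim_changed_partir_tokens_largos_py : Prop := Dom_partir_tokens_largos_py (pvDiffWitness_partir_tokens_largos_py.1) (pvDiffWitness_partir_tokens_largos_py.2) ∧ Pre_partir_tokens_largos_py (pvDiffWitness_partir_tokens_largos_py.1) (pvDiffWitness_partir_tokens_largos_py.2) ∧ D_partir_tokens_largos_py (pvDiffWitness_partir_tokens_largos_py.1) (pvDiffWitness_partir_tokens_largos_py.2) ∧ partir_tokens_largos_py (pvDiffWitness_partir_tokens_largos_py.1) (pvDiffWitness_partir_tokens_largos_py.2) = pvDiffWitnessOut_partir_tokens_largos_py.1 ∧ partir_tokens_largos_py_alt (pvDiffWitness_partir_tokens_largos_py.1) (pvDiffWitness_partir_tokens_largos_py.2) = pvDiffWitnessOut_partir_tokens_largos_py.2 ∧ pvDiffWitnessOut_partir_tokens_largos_py.1 ≠ pvDiffWitnessOut_partir_tokens_largos_py.2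
def Claim_exact_partir_tokens_largos_py : Prop := ∀ (texto : String) (max_len : Int), Dom_partir_tokens_largos_py texto max_len → Pre_partir_tokens_largos_py texto max_len → D_partir_tokens_largos_py texto max_len → partir_tokens_largos_py texto max_len ≠ partir_tokens_largos_py_alt texto max_len

-- ===== LEMMAS AND PROOFS =====
def pvSp (cur : List Char) : List Char → List (List Char)
  | [] => [cur]
  | a :: rest => if a = ' ' then cur :: pvSp [] rest else pvSp (cur ++ [a]) rest

theorem pvSp_go (l : List Char) : ∀ (fuel : Nat) (cur : List Char) (acc : List (List Char)),
    l.length ≤ fuel →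
    PySem.Chars.splitOn.go [' '] fuel l cur acc = acc.reverse ++ pvSp cur.reverse l := by
  induction l with
  | nil =>
    intro fuel cur acc _
    cases fuel <;> simp [PySem.Chars.splitOn.go, pvSp]
  | cons a rest ih =>
    intro fuel cur acc hf
    cases fuel with
    | zero => simp at hf
    | succ fuel =>
      by_cases ha : a = ' '
      · subst ha
        have hpre : List.isPrefixOf [' '] (' ' :: rest) = true := by
          simp [List.isPrefixOf]
        rw [PySem.Chars.splitOn.go]
        simp only [hpre, if_pos, List.length_cons, List.length_nil, List.drop_succ_cons, List.drop_zero]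
        rw [ih fuel [] (cur.reverse :: acc) (by simpa using hf)]
        simp [pvSp]
      · have hpre : List.isPrefixOf [' '] (a :: rest) = false := by
          simp [List.isPrefixOf]
          exact fun h => ha h.symm
        rw [PySem.Chars.splitOn.go]
        simp only [hpre]
        rw [ih fuel (a :: cur) acc (by simpa using Nat.le_of_succ_le_succ hf)]
        simp [pvSp, ha]

theorem splitOn_single (s : List Char) :
    PySem.Chars.splitOn s [' '] = pvSp [] s := by
  rw [PySem.Chars.splitOn, pvSp_go s (s.length+1) [] [] (by omega)]
  simp


theorem pvStepB_out (max_len : Int) (l : List Char) : ∀ (out : List Char) (r : Int),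
    l.foldl (pvStepB max_len) (out, r) =
      (out ++ (l.foldl (pvStepB max_len) ([], r)).1, (l.foldl (pvStepB max_len) ([], r)).2) := by
  induction l with
  | nil => intro out r; simp
  | cons c l ih =>
    intro out r
    simp only [List.foldl_cons]
    by_cases hc : c = ' '
    · simp only [pvStepB, if_pos hc, List.nil_append]
      rw [ih (out ++ [c]) 0, ih [c] 0]
      simp
    · by_cases hr : r = max_len
      · simp only [pvStepB, if_neg hc, if_pos hr, List.nil_append]
        rw [ih (out ++ [' ', c]) 1, ih [' ', c] 1]
        simp
      · simp only [pvStepB, if_neg hc, if_neg hr, List.nil_append]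
        rw [ih (out ++ [c]) (r+1), ih [c] (r+1)]
        simp

def pvEmit (m r : Int) : List Char → List Char
  | [] => []
  | c :: w => if r = m then ' ' :: c :: pvEmit m 1 w else c :: pvEmit m (r + 1) w

theorem pvScan_word (m : Int) (w : List Char) (hw : ∀ c ∈ w, c ≠ ' ') :
    ∀ r : Int, (w.foldl (pvStepB m) ([], r)).1 = pvEmit m r w := by
  induction w with
  | nil => intro r; simp [pvEmit]
  | cons c w ih =>
    intro r
    have hc : c ≠ ' ' := hw c (by simp)
    have hw' : ∀ c ∈ w, c ≠ ' ' := fun x hx => hw x (by simp [hx])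
    simp only [List.foldl_cons, pvEmit]
    by_cases hr : r = m
    · simp only [pvStepB, if_neg hc, if_pos hr, List.nil_append]
      rw [pvStepB_out m w [' ', c] 1, ih hw' 1]
      simp
    · simp only [pvStepB, if_neg hc, if_neg hr, List.nil_append]
      rw [pvStepB_out m w [c] (r+1), ih hw' (r+1)]
      simp

theorem pvEmit_top (m : Int) (hm : 0 < m) (w : List Char) :
    pvEmit m m w = match w with | [] => [] | _ :: _ => ' ' :: pvEmit m 0 w := by
  cases w with
  | nil => simp [pvEmit]
  | cons c w =>
    have h0 : ((0:Int) = m) = False := by simp; omega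
    simp [pvEmit, h0]

theorem pvEmit_take (m : Int) (hm : 0 < m) (w : List Char) :
    ∀ r : Int, 0 ≤ r → r ≤ m →
    pvEmit m r w = w.take (m - r).toNat ++
      (if w.length ≤ (m - r).toNat then [] else pvEmit m m (w.drop (m - r).toNat)) := by
  induction w with
  | nil => intro r _ _; simp [pvEmit]
  | cons c w ih =>
    intro r h0 hrm
    by_cases hr : r = m
    · subst hr
      simp [pvEmit]
    · have hk : (m - r).toNat = (m - (r+1)).toNat + 1 := by omega
      simp only [pvEmit, if_neg hr, hk, List.take_succ_cons, List.drop_succ_cons,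
        List.length_cons]
      rw [ih (r+1) (by omega) (by omega)]
      have : (w.length + 1 ≤ (m - (r+1)).toNat + 1) = (w.length ≤ (m - (r+1)).toNat) := by
        simp
      simp [this]


theorem pvRange_step_cons (m b : Int) (hm : 0 < m) (hb : 0 < b) :
    PySem.List.pyRange 0 b m = 0 :: (PySem.List.pyRange 0 (b - m) m).map (· + m) := by
  rw [PySem.List.pyRange_of_pos 0 b hm, PySem.List.pyRange_of_pos 0 (b - m) hm]
  have key : (b + m - 1) / m = (b - 1) / m + 1 := by
    have : b + m - 1 = (b - 1) + 1 * m := by ring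
    rw [this, Int.add_mul_ediv_right _ _ hm.ne']
  by_cases hbm : 0 < b - m
  · have h1 : (if (0:Int) < b then ((b - 0 + m - 1) / m).toNat else 0)
        = ((b - m + m - 1) / m).toNat + 1 := by
      rw [if_pos hb]
      have e1 : b - 0 + m - 1 = b + m - 1 := by ring
      have e2 : b - m + m - 1 = b - 1 := by ring
      rw [e1, e2, key]
      have : 0 ≤ (b - 1) / m := Int.ediv_nonneg (by omega) (by omega)
      omega
    rw [h1, if_pos hbm, List.range_succ_eq_map]
    have e3 : b - m - 0 + m - 1 = b - m + m - 1 := by ring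
    rw [e3]
    simp only [List.map_cons, List.map_map]
    congr 1
    · norm_num
    · apply List.map_congr_left
      intro k _
      simp only [Function.comp_apply]
      push_cast
      ring
  · have h2 : (if (0:Int) < b then ((b - 0 + m - 1) / m).toNat else 0) = 1 := by
      rw [if_pos hb]
      have e1 : b - 0 + m - 1 = b + m - 1 := by ring
      rw [e1, key, Int.ediv_eq_zero_of_lt (by omega) (by omega)]
      rfl
    rw [h2, if_neg hbm]
    simp
theorem pvChunks_cons (m : Int) (hm : 0 < m) (w : List Char) (hw : w ≠ []) :
    pvChunksA w m = w.take m.toNat :: pvChunksA (w.drop m.toNat) m := by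
  have hb : 0 < (w.length : Int) := by
    simp [List.length_pos_iff]; exact hw
  unfold pvChunksA
  rw [pvRange_step_cons m (w.length : Int) hm hb]
  simp only [List.map_cons, List.map_map]
  congr 1
  · have : (0:Int) + m = m := by ring
    rw [this, PySem.List.slice_zero_start, PySem.List.slice_to w (le_of_lt hm)]
  · -- align ranges and slices
    have hlen : ((w.drop m.toNat).length : Int) = max ((w.length : Int) - m) 0 := by
      simp [List.length_drop]
      omega
    by_cases hc : (w.length : Int) - m ≤ 0
    · -- both ranges empty
      have r1 : PySem.List.pyRange 0 ((w.length : Int) - m) m = [] := by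
        rw [PySem.List.pyRange_of_pos _ _ hm, if_neg (by omega)]; rfl
      have r2 : PySem.List.pyRange 0 ((w.drop m.toNat).length : Int) m = [] := by
        rw [PySem.List.pyRange_of_pos _ _ hm, if_neg (by omega)]; rfl
      rw [r1, r2]; simp
    · have hl2 : ((w.drop m.toNat).length : Int) = (w.length : Int) - m := by omega
      rw [← hl2]
      apply List.map_congr_left
      intro i hi
      have h0i : 0 ≤ i := ((PySem.List.mem_pyRange_iff_of_pos hm i).1 hi).1
      simp only [Function.comp_apply]
      obtain ⟨j, rfl⟩ : ∃ j : Nat, i = (j : Int) := ⟨i.toNat, by omega⟩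
      have eA : (j : Int) + m = ((j + m.toNat : Nat) : Int) := by push_cast; omega
      have eB : (j : Int) + m + m = ((j + m.toNat : Nat) : Int) + ((m.toNat : Nat) : Int) := by
        push_cast; omega
      rw [eB, eA, PySem.List.slice_natCast_add w (j + m.toNat) m.toNat]
      have eC : ((j + m.toNat : Nat) : Int) = ((j : Nat) : Int) + ((m.toNat : Nat) : Int) := by
        push_cast; ring
      rw [eC, PySem.List.slice_natCast_add (w.drop m.toNat) j m.toNat, List.drop_drop,
        Nat.add_comm m.toNat j]

theorem pvRange_zero (m : Int) : PySem.List.pyRange 0 0 m = [] := by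
  unfold PySem.List.pyRange
  split_ifs <;> simp_all

theorem pvRange_neg (m b : Int) (hm : m < 0) (hb : 0 ≤ b) :
    PySem.List.pyRange 0 b m = [] := by
  unfold PySem.List.pyRange
  split_ifs <;> simp_all <;> omega

theorem pvJoin_chunks_n (m : Int) (hm : 0 < m) :
    ∀ (n : Nat) (w : List Char), w.length ≤ n →
    PySem.Chars.join [' '] (pvChunksA w m) = pvEmit m 0 w := by
  intro n
  induction n with
  | zero =>
    intro w hw
    have : w = [] := List.length_eq_zero_iff.1 (Nat.le_zero.1 hw)
    subst this
    simp [pvChunksA, pvRange_zero, PySem.Chars.join_nil, pvEmit]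
  | succ n ih =>
    intro w hw
    by_cases hne : w = []
    · subst hne
      simp [pvChunksA, pvRange_zero, PySem.Chars.join_nil, pvEmit]
    · rw [pvChunks_cons m hm w hne]
      by_cases hlen : w.length ≤ m.toNat
      · have hdrop : w.drop m.toNat = [] := List.drop_eq_nil_iff.2 hlen
        rw [hdrop]
        simp only [pvChunksA, List.length_nil, Nat.cast_zero, pvRange_zero, List.map_nil,
          PySem.Chars.join_singleton]
        rw [pvEmit_take m hm w 0 le_rfl (le_of_lt hm)]
        have : (m - 0).toNat = m.toNat := by omega
        rw [this, if_pos hlen, List.take_of_length_le hlen, List.append_nil]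
      · have hdne : w.drop m.toNat ≠ [] := by
          rw [ne_eq, List.drop_eq_nil_iff]; omega
        have hdle : (w.drop m.toNat).length ≤ n := by
          rw [List.length_drop]; omega
        rw [pvChunks_cons m hm _ hdne, PySem.Chars.join_cons_cons, ← pvChunks_cons m hm _ hdne,
          ih _ hdle]
        rw [pvEmit_take m hm w 0 le_rfl (le_of_lt hm)]
        have e : (m - 0).toNat = m.toNat := by omega
        rw [e, if_neg hlen, pvEmit_top m hm]
        cases hd : w.drop m.toNat with
        | nil => exact absurd hd hdne
        | cons a t => simp

theorem pvJoin_chunks (m : Int) (hm : 0 < m) (w : List Char) :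
    PySem.Chars.join [' '] (pvChunksA w m) = pvEmit m 0 w :=
  pvJoin_chunks_n m hm w.length w le_rfl

theorem pvWordA_emit (m : Int) (hm : 0 < m) (w : List Char) :
    pvWordA w m = pvEmit m 0 w := by
  unfold pvWordA
  by_cases h : (w.length : Int) > m
  · rw [if_pos h, pvJoin_chunks m hm]
  · rw [if_neg h, pvEmit_take m hm w 0 le_rfl (le_of_lt hm)]
    have hlen : w.length ≤ (m - 0).toNat := by omega
    rw [if_pos hlen, List.take_of_length_le hlen, List.append_nil]

theorem pvSp_ne_nil (l : List Char) : ∀ cur, pvSp cur l ≠ [] := by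
  induction l with
  | nil => intro cur; simp [pvSp]
  | cons a rest ih =>
    intro cur
    by_cases ha : a = ' ' <;> simp [pvSp, ha] <;> exact ih _

theorem pvSp_word (w : List Char) (hw : ∀ c ∈ w, c ≠ ' ') :
    ∀ cur rest, pvSp cur (w ++ ' ' :: rest) = (cur ++ w) :: pvSp [] rest := by
  induction w with
  | nil => intro cur rest; simp [pvSp]
  | cons a w ih =>
    intro cur rest
    have ha : a ≠ ' ' := hw a (by simp)
    simp only [List.cons_append, pvSp, if_neg ha]
    rw [ih (fun c hc => hw c (by simp [hc])) (cur ++ [a]) rest]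
    simp

theorem pvSp_last (w : List Char) (hw : ∀ c ∈ w, c ≠ ' ') :
    ∀ cur, pvSp cur w = [cur ++ w] := by
  induction w with
  | nil => intro cur; simp [pvSp]
  | cons a w ih =>
    intro cur
    have ha : a ≠ ' ' := hw a (by simp)
    simp only [pvSp, if_neg ha]
    rw [ih (fun c hc => hw c (by simp [hc])) (cur ++ [a])]
    simp

theorem pvSplitFirst (l : List Char) (h : ' ' ∈ l) :
    ∃ w t, l = w ++ ' ' :: t ∧ ∀ c ∈ w, c ≠ ' ' := by
  induction l with
  | nil => simp at h
  | cons a rest ih =>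
    by_cases ha : a = ' '
    · exact ⟨[], rest, by simp [ha], by simp⟩
    · have hr : ' ' ∈ rest := by
        rcases List.mem_cons.1 h with h1 | h1
        · exact absurd h1.symm ha
        · exact h1
      obtain ⟨w, t, hl, hw⟩ := ih hr
      refine ⟨a :: w, t, by simp [hl], ?_⟩
      intro c hc
      rcases List.mem_cons.1 hc with rfl | hc2
      · exact ha
      · exact hw c hc2

theorem pvMain_n (m : Int) (hm : 0 < m) :
    ∀ (n : Nat) (l : List Char), l.length ≤ n →
    PySem.Chars.join [' '] ((pvSp [] l).map (fun p => pvWordA p m)) =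
      (l.foldl (pvStepB m) ([], 0)).1 := by
  intro n
  induction n with
  | zero =>
    intro l hl
    have : l = [] := List.length_eq_zero_iff.1 (Nat.le_zero.1 hl)
    subst this
    simp [pvSp, pvWordA, pvChunksA, pvRange_zero, PySem.Chars.join_singleton]
  | succ n ih =>
    intro l hl
    by_cases hsp : ' ' ∈ l
    · obtain ⟨w, t, hlw, hwns⟩ := pvSplitFirst l hsp
      subst hlw
      have hlt : t.length ≤ n := by simp at hl; omega
      rw [pvSp_word w hwns [] t, List.nil_append, List.map_cons]
      obtain ⟨p, ps, hps⟩ : ∃ p ps, pvSp ([] : List Char) t = p :: ps := by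
        cases hh : pvSp ([] : List Char) t with
        | nil => exact absurd hh (pvSp_ne_nil t [])
        | cons p ps => exact ⟨p, ps, rfl⟩
      have h2 : List.map (fun p => pvWordA p m) (pvSp ([] : List Char) t) =
          pvWordA p m :: List.map (fun p => pvWordA p m) ps := by rw [hps, List.map_cons]
      rw [h2, PySem.Chars.join_cons_cons, ← h2, ih t hlt]
      rw [List.foldl_append, List.foldl_cons]
      have hspc : pvStepB m (List.foldl (pvStepB m) ([], 0) w) ' '
          = ((List.foldl (pvStepB m) ([], 0) w).1 ++ [' '], 0) := by
        simp [pvStepB]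
      rw [hspc, pvStepB_out m t ((List.foldl (pvStepB m) ([], 0) w).1 ++ [' ']) 0,
        pvScan_word m w hwns 0, pvWordA_emit m hm]
    · have hwns : ∀ c ∈ l, c ≠ ' ' := fun c hc he => hsp (he ▸ hc)
      rw [pvSp_last l hwns [], List.map_cons, List.map_nil, PySem.Chars.join_singleton,
        pvWordA_emit m hm, pvScan_word m l hwns 0]
      simp

theorem pvWordA_nil (m : Int) : pvWordA [] m = [] := by
  unfold pvWordA pvChunksA
  simp [pvRange_zero, PySem.Chars.join_nil]

theorem pvAllSpaceA (m : Int) (l : List Char) (h : ∀ c ∈ l, c = ' ') :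
    PySem.Chars.join [' '] ((pvSp [] l).map (fun p => pvWordA p m)) = l := by
  induction l with
  | nil => simp [pvSp, pvWordA_nil, PySem.Chars.join_singleton]
  | cons a rest ih =>
    have ha : a = ' ' := h a (by simp)
    subst ha
    have hstep : pvSp ([] : List Char) (' ' :: rest) = [] :: pvSp [] rest := by simp [pvSp]
    rw [hstep, List.map_cons, pvWordA_nil]
    obtain ⟨p, ps, hps⟩ : ∃ p ps, pvSp ([] : List Char) rest = p :: ps := by
      cases hh : pvSp ([] : List Char) rest with
      | nil => exact absurd hh (pvSp_ne_nil rest [])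
      | cons p ps => exact ⟨p, ps, rfl⟩
    have h2 : List.map (fun p => pvWordA p m) (pvSp ([] : List Char) rest) =
        pvWordA p m :: List.map (fun p => pvWordA p m) ps := by rw [hps, List.map_cons]
    rw [h2, PySem.Chars.join_cons_cons, ← h2, ih (fun c hc => h c (by simp [hc]))]
    simp

theorem pvAllSpaceB (m : Int) (l : List Char) (h : ∀ c ∈ l, c = ' ') :
    (l.foldl (pvStepB m) ([], 0)).1 = l := by
  induction l with
  | nil => simp
  | cons a rest ih =>
    have ha : a = ' ' := h a (by simp)
    subst ha
    rw [List.foldl_cons, show pvStepB m (([] : List Char), (0:Int)) ' ' = ([' '], 0) from by simp [pvStepB]]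
    rw [pvStepB_out m rest [' '] 0, ih (fun c hc => h c (by simp [hc]))]
    simp

theorem pvA_eq (texto : String) (m : Int) :
    partir_tokens_largos_py texto m =
      String.ofList (PySem.Chars.join [' ']
        ((pvSp [] texto.toList).map (fun p => pvWordA p m))) := by
  simp only [partir_tokens_largos_py, splitOn_single,
    PySem.List.foldl_append_singleton_eq_map, List.nil_append]

theorem pvScanB_neg (m : Int) (hm : m < 0) (l : List Char) :
    ∀ r : Int, 0 ≤ r → (l.foldl (pvStepB m) ([], r)).1 = l := by
  induction l with
  | nil => intro r _; simp
  | cons a rest ih =>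
    intro r hr
    by_cases ha : a = ' '
    · subst ha
      rw [List.foldl_cons, show pvStepB m (([] : List Char), r) ' ' = ([' '], 0) from by simp [pvStepB]]
      rw [pvStepB_out m rest [' '] 0, ih 0 le_rfl]
      simp
    · rw [List.foldl_cons, show pvStepB m (([] : List Char), r) a = ([a], r + 1) from by
        simp [pvStepB, ha]; omega]
      rw [pvStepB_out m rest [a] (r+1), ih (r+1) (by omega)]
      simp

theorem pvJoinNilsAll (k : List (List Char)) (h : ∀ p ∈ k, p = ([] : List Char)) :
    ∀ x ∈ PySem.Chars.join [' '] k, x = ' ' := by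
  induction k with
  | nil => simp [PySem.Chars.join_nil]
  | cons p rest ih =>
    cases rest with
    | nil =>
      rw [PySem.Chars.join_singleton, h p (by simp)]
      simp
    | cons q rest' =>
      rw [PySem.Chars.join_cons_cons, h p (by simp)]
      intro x hx
      simp only [List.nil_append, List.cons_append, List.mem_cons] at hx
      rcases hx with rfl | hx
      · rfl
      · exact ih (fun r hr => h r (by simp [hr])) x (by simpa using hx)

-- ===== VERDICT (by name: the statement is the Claim_ definition above) =====
theorem partir_tokens_largos_py_spec : Claim_unchanged_partir_tokens_largos_py := by
  unfold Claim_unchanged_partir_tokens_largos_py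
  intro texto m _ hpre
  unfold Spec_partir_tokens_largos_py
  intro hnd
  unfold partir_tokens_largos_py_alt
  rw [pvA_eq]
  by_cases hall : ∀ c ∈ texto.toList, c = ' '
  · rw [pvAllSpaceA m _ hall, pvAllSpaceB m _ hall]
  · push_neg at hall
    obtain ⟨c, hc, hcne⟩ := hall
    have hm : 0 < m := by
      unfold D_partir_tokens_largos_py at hnd
      rcases hpre with h1 | h1
      · by_contra hle
        push_neg at hle
        refine hnd ⟨lt_of_le_of_ne hle h1, ?_⟩
        rw [List.any_eq_true]
        exact ⟨c, hc, by simpa using hcne⟩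
      · exact absurd (h1 c hc) hcne
    rw [pvMain_n m hm texto.toList.length texto.toList le_rfl]

theorem partir_tokens_largos_py_tight : Claim_exact_partir_tokens_largos_py := by
  unfold Claim_exact_partir_tokens_largos_py
  intro texto m _ _ hd heq
  unfold D_partir_tokens_largos_py at hd
  rcases hd with ⟨hm, hany⟩
  rw [List.any_eq_true] at hany
  obtain ⟨c, hc, hb⟩ := hany
  have hcne : c ≠ ' ' := by simpa using hb
  have hB : partir_tokens_largos_py_alt texto m = String.ofList texto.toList := by
    unfold partir_tokens_largos_py_alt
    rw [pvScanB_neg m hm texto.toList 0 le_rfl]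
  have hA : ∀ x ∈ (PySem.Chars.join [' ']
      ((pvSp [] texto.toList).map (fun p => pvWordA p m))), x = ' ' := by
    apply pvJoinNilsAll
    intro p hp
    rcases List.mem_map.1 hp with ⟨q, _, rfl⟩
    unfold pvWordA
    rw [if_pos (by omega : (q.length : Int) > m)]
    unfold pvChunksA
    rw [pvRange_neg m _ hm (by positivity)]
    simp [PySem.Chars.join_nil]
  rw [pvA_eq, hB] at heq
  have : PySem.Chars.join [' '] ((pvSp [] texto.toList).map (fun p => pvWordA p m)) = texto.toList := by
    have := congrArg String.toList heq
    simpa using this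
  rw [this] at hA
  exact hcne (hA c hc)

theorem partir_tokens_largos_py_changed : Claim_changed_partir_tokens_largos_py := by
  unfold Claim_changed_partir_tokens_largos_py
  refine ⟨by decide, by decide, by decide, ?_, by decide, by decide⟩
  set_option maxRecDepth 60000 in decide
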